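-- pv_equiv track=rewrite | github.com/epilectrik/voynich | phases/AZC_INTERFACE_VALIDATION/test1_ptext_reclassification.py | get_line_initial_profile
-- ===== SOURCE A (Python) =====
-- from collections import defaultdict, Counter
--
-- def get_line_initial_profile(tokens):
--     """Get distribution of tokens at line position 1"""
--     by_line = defaultdict(list)
--     for t in tokens:
--         key = (t.get('folio', ''), t.get('line', ''))
--         by_line[key].append(t)
--
--     initial_tokens = Counter()
--     for key, toks in by_line.items():
--         if toks:
--             # Sort by position within line if available
--             sorted_toks = sorted(toks, key=lambda x: int(x.get('position', 0) or 0))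
--             if sorted_toks:
--                 initial_tokens[sorted_toks[0].get('token', '')] += 1
--     return initial_tokens
-- ===== SOURCE B (Python) =====
-- from collections import Counter
--
-- def get_line_initial_profile(tokens):
--     """Get distribution of tokens at line position 1"""
--     best = {}
--     for t in tokens:
--         key = (t.get('folio', ''), t.get('line', ''))
--         pos = int(t.get('position', 0) or 0)
--         cur = best.get(key)
--         best[key] = (pos, t.get('token', '')) if cur is None or pos < cur[0] else cur
--     out = Counter()
--     for _pos, tok in best.values():
--         out[tok] += 1
--     return out
-- ===== Notes on version B (the rewrite author's own statement) =====
-- stated objective: simpler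
-- what changed: Replaces per-line grouping into lists followed by a sort of each line (head taken) with a single pass keeping one running strict-minimum (position, token) per (folio, line) key, then counting the retained tokens; no intermediate lists and no sort.
import Mathlib
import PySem

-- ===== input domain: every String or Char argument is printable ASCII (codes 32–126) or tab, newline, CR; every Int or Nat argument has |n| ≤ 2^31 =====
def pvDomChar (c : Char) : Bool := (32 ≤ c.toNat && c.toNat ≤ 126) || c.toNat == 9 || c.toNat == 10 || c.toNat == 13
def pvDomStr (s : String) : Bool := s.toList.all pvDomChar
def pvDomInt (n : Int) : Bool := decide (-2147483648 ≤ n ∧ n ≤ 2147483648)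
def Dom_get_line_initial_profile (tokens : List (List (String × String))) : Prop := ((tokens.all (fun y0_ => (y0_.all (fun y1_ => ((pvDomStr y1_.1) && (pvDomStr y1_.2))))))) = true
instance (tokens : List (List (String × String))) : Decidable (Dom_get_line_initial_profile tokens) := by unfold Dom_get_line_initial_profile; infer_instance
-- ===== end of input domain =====

-- B replaces per-line grouping + per-line sort (head taken) with a single pass keeping a running
-- strict-minimum (position, token) per (folio, line) key, then counting the retained tokens (simpler).


-- ===== PORT A =====
-- shared helpers: Python's t.get(k, default) (a dict read, first-match on the association list),
-- the (folio, line) key, and the sort key int(t.get('position', 0) or 0) (outside Pre_, where int()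
-- would raise ValueError, the port uses 0 — nothing is claimed there).
def pvGetS (t : List (String × String)) (k dflt : String) : String :=
  (PySem.Dict.mk t).getD k dflt

def pvKeyOf (t : List (String × String)) : String × String :=
  (pvGetS t "folio" "", pvGetS t "line" "")

def pvPosOf (t : List (String × String)) : Int :=
  match (PySem.Dict.mk t).get? "position" with
  | none => 0
  | some s => if s = "" then 0 else (PySem.Int.ofStr? s).getD 0

def get_line_initial_profile (tokens : List (List (String × String))) : List (String × Int) :=
  let by_line : PySem.Dict (String × String) (List (List (String × String))) :=
    tokens.foldl (fun d t => d.modify (pvKeyOf t) [] (fun l => l ++ [t])) PySem.Dict.empty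
  let initial_tokens : PySem.Dict String Int :=
    by_line.items.foldl (fun c p =>
      match p.2 with
      | [] => c
      | _ :: _ =>
        match PySem.List.sorted p.2 pvPosOf false with
        | [] => c
        | m :: _ => c.modify (pvGetS m "token" "") 0 (· + 1)) PySem.Dict.empty
  initial_tokens.items

-- ===== PORT B =====
def get_line_initial_profile_alt (tokens : List (List (String × String))) : List (String × Int) :=
  let best : PySem.Dict (String × String) (Int × String) :=
    tokens.foldl (fun d t =>
      let pos := pvPosOf t
      d.insert (pvKeyOf t)
        (match d.get? (pvKeyOf t) with
         | none => (pos, pvGetS t "token" "")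
         | some cur => if pos < cur.1 then (pos, pvGetS t "token" "") else cur)) PySem.Dict.empty
  let out : PySem.Dict String Int :=
    best.values.foldl (fun c v => c.modify v.2 0 (· + 1)) PySem.Dict.empty
  out.items

-- ===== PRECONDITION & SPEC =====
-- Pre_ excludes exactly the inputs on which A raises ValueError: a token whose 'position' value is a
-- nonempty string that int() cannot parse.
def Pre_get_line_initial_profile (tokens : List (List (String × String))) : Prop :=
  ∀ t ∈ tokens, (((PySem.Dict.mk t).get? "position").all
    (fun s => s == "" || (PySem.Int.ofStr? s).isSome)) = true
instance (tokens : List (List (String × String))) : Decidable (Pre_get_line_initial_profile tokens) := by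
  unfold Pre_get_line_initial_profile; infer_instance

def pvWitness_get_line_initial_profile : (List (List (String × String))) :=
  [[("folio", "f1"), ("line", "1"), ("position", "2"), ("token", "daiin")],
   [("folio", "f1"), ("line", "1"), ("position", "1"), ("token", "chol")]]

def Spec_get_line_initial_profile (tokens : List (List (String × String))) (out : List (String × Int)) : Prop := out = get_line_initial_profile_alt tokens
instance (tokens : List (List (String × String))) (out : List (String × Int)) : Decidable (Spec_get_line_initial_profile tokens out) := by unfold Spec_get_line_initial_profile; infer_instance

-- ===== CLAIM (what is proved, stated in full; the proofs are below) =====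
def Claim_equal_get_line_initial_profile : Prop := ∀ (tokens : List (List (String × String))), Dom_get_line_initial_profile tokens → Pre_get_line_initial_profile tokens → Spec_get_line_initial_profile tokens (get_line_initial_profile tokens)

-- ===== LEMMAS AND PROOFS =====

-- abbreviations used only by the proofs
def pvTok (t : List (String × String)) : String := pvGetS t "token" ""

-- the running strict-minimum step on elements (first minimal element wins)
def pvElemStep (b t : List (String × String)) : List (String × String) :=
  if pvPosOf t < pvPosOf b then t else b

-- the running strict-minimum step on (pos, token) pairs, over an optional state (B's loop body)
def pvSelStep (b : Option (Int × String)) (t : List (String × String)) : Option (Int × String) :=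
  some (match b with
        | none => (pvPosOf t, pvTok t)
        | some cur => if pvPosOf t < cur.1 then (pvPosOf t, pvTok t) else cur)

theorem pv_pairFold_eq_elemFold (l : List (List (String × String))) (m : List (String × String)) :
    l.foldl (fun b t => if pvPosOf t < b.1 then (pvPosOf t, pvTok t) else b) (pvPosOf m, pvTok m)
      = (pvPosOf (l.foldl pvElemStep m), pvTok (l.foldl pvElemStep m)) := by
  induction l generalizing m with
  | nil => rfl
  | cons h tl ih =>
    simp only [List.foldl_cons, pvElemStep]
    by_cases hc : pvPosOf h < pvPosOf m <;> simp [hc, ih]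

theorem pv_selFold_some (l : List (List (String × String))) (x : Int × String) :
    l.foldl pvSelStep (some x)
      = some (l.foldl (fun b t => if pvPosOf t < b.1 then (pvPosOf t, pvTok t) else b) x) := by
  induction l generalizing x with
  | nil => rfl
  | cons h tl ih =>
    simp only [List.foldl_cons, pvSelStep]
    by_cases hc : pvPosOf h < x.1 <;> simp [hc, ih]

-- B's dict lookup after the loop: the strict-minimum fold over the tokens of that key
theorem pv_best_get? (l : List (List (String × String)))
    (d : PySem.Dict (String × String) (Int × String)) (k : String × String) :
    ((l.foldl (fun d t =>
        d.insert (pvKeyOf t)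
          (match d.get? (pvKeyOf t) with
           | none => (pvPosOf t, pvTok t)
           | some cur => if pvPosOf t < cur.1 then (pvPosOf t, pvTok t) else cur)) d).get? k)
      = (l.filter (fun t => pvKeyOf t == k)).foldl pvSelStep (d.get? k) := by
  induction l generalizing d with
  | nil => rfl
  | cons h tl ih =>
    simp only [List.foldl_cons, List.filter_cons]
    by_cases hk : pvKeyOf h = k
    · subst hk
      simp only [beq_self_eq_true, if_pos, List.foldl_cons]
      rw [ih, PySem.Dict.get?_insert]
      simp [pvSelStep, pvTok]
    · have : (pvKeyOf h == k) = false := by simp [hk]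
      simp only [this, if_neg, Bool.false_eq_true, not_false_iff]
      rw [ih, PySem.Dict.get?_insert]
      simp [Ne.symm hk]

-- head of the stable sort: the first strictly-minimal element (via the insertBy unfolding)
theorem pv_foldl_insertBy_head (l : List (List (String × String)))
    (a : List (String × String)) (rest : List (List (String × String))) :
    ∃ rest', l.foldl (fun acc x => PySem.List.insertBy (fun p q => decide (pvPosOf p < pvPosOf q)) x acc) (a :: rest)
      = (l.foldl pvElemStep a) :: rest' := by
  induction l generalizing a rest with
  | nil => exact ⟨rest, rfl⟩
  | cons h tl ih =>
    simp only [List.foldl_cons, pvElemStep]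
    by_cases hc : pvPosOf h < pvPosOf a
    · have : PySem.List.insertBy (fun p q => decide (pvPosOf p < pvPosOf q)) h (a :: rest)
          = h :: a :: rest := by simp [PySem.List.insertBy, hc]
      rw [this]
      simpa [hc] using ih h (a :: rest)
    · have : PySem.List.insertBy (fun p q => decide (pvPosOf p < pvPosOf q)) h (a :: rest)
          = a :: PySem.List.insertBy (fun p q => decide (pvPosOf p < pvPosOf q)) h rest := by
        simp [PySem.List.insertBy, hc]
      rw [this]
      simpa [hc] using ih a _
  
theorem pv_sorted_cons (h : List (String × String)) (tl : List (List (String × String))) :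
    ∃ rest', PySem.List.sorted (h :: tl) pvPosOf false = (tl.foldl pvElemStep h) :: rest' := by
  rw [PySem.List.sorted_eq_foldl_insertBy]
  simp only [List.foldl_cons]
  have h0 : PySem.List.insertBy (fun p q => decide (pvPosOf p < pvPosOf q)) h ([] : List (List (String × String))) = [h] := by
    simp [PySem.List.insertBy]
  rw [h0]
  exact pv_foldl_insertBy_head tl h []


-- the (folio, line) keys in first-occurrence order, and the tokens of one key
def pvK (tokens : List (List (String × String))) : List (String × String) :=
  PySem.Set.ofList (tokens.map pvKeyOf)

def pvGrp (tokens : List (List (String × String))) (k : String × String) :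
    List (List (String × String)) :=
  tokens.filter (fun t => pvKeyOf t == k)

-- A's grouping dict, characterised: items = keys in first-occurrence order paired with their groups
theorem pv_byline_items (tokens : List (List (String × String))) :
    (tokens.foldl (fun d t => d.modify (pvKeyOf t) [] (fun l => l ++ [t]))
        (PySem.Dict.empty : PySem.Dict (String × String) (List (List (String × String))))).items
      = (pvK tokens).map (fun k => (k, pvGrp tokens k)) := by
  have hrw : tokens.foldl (fun d t => d.modify (pvKeyOf t) [] (fun l => l ++ [t]))
        (PySem.Dict.empty : PySem.Dict (String × String) (List (List (String × String))))
      = (tokens.map (fun t => (pvKeyOf t, t))).foldl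
          (fun d p => d.modify p.1 [] (fun l => l ++ [p.2])) PySem.Dict.empty := by
    rw [List.foldl_map]
  have hnd : (tokens.foldl (fun d t => d.modify (pvKeyOf t) [] (fun l => l ++ [t]))
      (PySem.Dict.empty : PySem.Dict (String × String) (List (List (String × String))))).keys.Nodup := by
    exact PySem.Dict.nodup_keys_foldl_modify_key tokens pvKeyOf [] (fun d t l => l ++ [t]) _
      PySem.Dict.nodup_keys_empty
  rw [PySem.Dict.items_eq_map_keys _ hnd []]
  have hkeys : (tokens.foldl (fun d t => d.modify (pvKeyOf t) [] (fun l => l ++ [t]))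
      (PySem.Dict.empty : PySem.Dict (String × String) (List (List (String × String))))).keys
      = pvK tokens := by
    rw [PySem.Dict.keys_foldl_modify_key]
    simp [pvK, PySem.Set.update, PySem.Set.ofList_eq_foldl]
  rw [hkeys]
  apply List.map_congr_left
  intro k _
  rw [hrw, PySem.Dict.getD_foldl_modify_append]
  simp [pvGrp, List.filter_map, Function.comp_def]

-- B's dict, characterised: values = per key, the strict-minimum fold over that key's tokens
theorem pv_best_values (tokens : List (List (String × String))) :
    (tokens.foldl (fun d t =>
        d.insert (pvKeyOf t)
          (match d.get? (pvKeyOf t) with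
           | none => (pvPosOf t, pvTok t)
           | some cur => if pvPosOf t < cur.1 then (pvPosOf t, pvTok t) else cur))
        (PySem.Dict.empty : PySem.Dict (String × String) (Int × String))).values
      = (pvK tokens).map (fun k => ((pvGrp tokens k).foldl pvSelStep none).getD (0, "")) := by
  have hnd : (tokens.foldl (fun d t =>
      d.insert (pvKeyOf t)
        (match d.get? (pvKeyOf t) with
         | none => (pvPosOf t, pvTok t)
         | some cur => if pvPosOf t < cur.1 then (pvPosOf t, pvTok t) else cur))
      (PySem.Dict.empty : PySem.Dict (String × String) (Int × String))).keys.Nodup := by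
    exact PySem.Dict.nodup_keys_foldl_insert_key tokens pvKeyOf _ _ PySem.Dict.nodup_keys_empty
  rw [PySem.Dict.values_eq_map_keys _ hnd (0, "")]
  have hkeys : (tokens.foldl (fun d t =>
      d.insert (pvKeyOf t)
        (match d.get? (pvKeyOf t) with
         | none => (pvPosOf t, pvTok t)
         | some cur => if pvPosOf t < cur.1 then (pvPosOf t, pvTok t) else cur))
      (PySem.Dict.empty : PySem.Dict (String × String) (Int × String))).keys = pvK tokens := by
    rw [PySem.Dict.keys_foldl_insert_key]
    simp [pvK, PySem.Set.update, PySem.Set.ofList_eq_foldl]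
  rw [hkeys]
  apply List.map_congr_left
  intro k _
  rw [PySem.Dict.getD_eq_get?_getD, pv_best_get?]
  simp [pvGrp, PySem.Dict.get?_empty]

-- ===== VERDICT (by name: the statement is the Claim_ definition above) =====
theorem get_line_initial_profile_spec : Claim_equal_get_line_initial_profile := by
  intro tokens _ _
  unfold Spec_get_line_initial_profile get_line_initial_profile get_line_initial_profile_alt
  show (_ : PySem.Dict String Int).items = (_ : PySem.Dict String Int).items
  have hfun : (fun (d : PySem.Dict (String × String) (Int × String)) t =>
      let pos := pvPosOf t
      d.insert (pvKeyOf t)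
        (match d.get? (pvKeyOf t) with
         | none => (pos, pvGetS t "token" "")
         | some cur => if pos < cur.1 then (pos, pvGetS t "token" "") else cur))
      = (fun (d : PySem.Dict (String × String) (Int × String)) t =>
      d.insert (pvKeyOf t)
        (match d.get? (pvKeyOf t) with
         | none => (pvPosOf t, pvTok t)
         | some cur => if pvPosOf t < cur.1 then (pvPosOf t, pvTok t) else cur)) := rfl
  rw [hfun, pv_byline_items tokens, pv_best_values tokens, List.foldl_map, List.foldl_map]
  congr 1
  apply PySem.List.foldl_congr_mem
  intro acc k hk
  have hk' : k ∈ tokens.map pvKeyOf := (PySem.Set.mem_ofList _ _).mp hk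
  have hne : pvGrp tokens k ≠ [] := by
    rcases List.mem_map.mp hk' with ⟨t, ht, rfl⟩
    intro hnil
    have hmem : t ∈ pvGrp tokens (pvKeyOf t) := by simp [pvGrp, ht]
    rw [hnil] at hmem
    exact (List.not_mem_nil) hmem
  rcases hg : pvGrp tokens k with _ | ⟨h, tt⟩
  · exact absurd hg hne
  · rcases pv_sorted_cons h tt with ⟨rest', hr⟩
    simp only [hr, List.foldl_cons]
    have hsel : pvSelStep none h = some (pvPosOf h, pvTok h) := rfl
    rw [hsel, pv_selFold_some, pv_pairFold_eq_elemFold]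
    rfl
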